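-- pv_equiv track=rewrite | github.com/eliottcassidy2000/math | 04-computation/skeleton_gs_geometry.py | is_gs_tiling
-- ===== SOURCE A (Python) =====
-- def get_tile_indices(n):
--     """Get the staircase tile indices for the tiling representation."""
--     tiles = []
--     for i in range(n):
--         for j in range(i+1, n):
--             tiles.append((i, j))
--     return tiles
--
-- def transpose_index(i, j, n):
--     """Grid transpose: (i,j) -> (n-1-j, n-1-i) in the staircase."""
--     return (n-1-j, n-1-i)
--
-- def is_gs_tiling(bits, n):
--     """Check if a tiling is grid-symmetric."""
--     tiles = get_tile_indices(n)
--     m = len(tiles)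
--     tile_to_idx = {t: idx for idx, t in enumerate(tiles)}
--
--     for idx, (i, j) in enumerate(tiles):
--         ti, tj = transpose_index(i, j, n)
--         # Make sure (ti, tj) is in upper-triangular form
--         if ti > tj:
--             ti, tj = tj, ti
--         if (ti, tj) not in tile_to_idx:
--             continue
--         tidx = tile_to_idx[(ti, tj)]
--         # GS: bit at idx must equal bit at tidx
--         if ((bits >> idx) & 1) != ((bits >> tidx) & 1):
--             return False
--     return True
-- ===== SOURCE B (Python) =====
-- def is_gs_tiling(bits, n):
--     """Check if a tiling is grid-symmetric.
--
--     Builds the grid-transposed bitmask directly via the closed-form triangular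
--     index (no tiles list, no dict) and compares it with the low bits of `bits`
--     in one integer equality."""
--     m = n * (n - 1) // 2 if n > 0 else 0
--     reflected = 0
--     idx = 0
--     for i in range(n):
--         for j in range(i + 1, n):
--             ti, tj = n - 1 - j, n - 1 - i
--             tidx = ti * (2 * n - ti - 1) // 2 + (tj - ti - 1)
--             reflected += ((bits >> tidx) & 1) << idx
--             idx += 1
--     return reflected == bits % (1 << m)
-- ===== Notes on version B (the rewrite author's own statement) =====
-- stated objective: alternative
-- what changed: B drops A's tiles list and tile->index dict entirely: it computes each tile's linear index by the closed-form triangular formula, accumulates the grid-transposed bitmask as one integer, and decides symmetry by a single integer equality against bits % (1 << m), instead of A's per-tile dict lookups with an early-return comparison loop.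
import Mathlib
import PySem

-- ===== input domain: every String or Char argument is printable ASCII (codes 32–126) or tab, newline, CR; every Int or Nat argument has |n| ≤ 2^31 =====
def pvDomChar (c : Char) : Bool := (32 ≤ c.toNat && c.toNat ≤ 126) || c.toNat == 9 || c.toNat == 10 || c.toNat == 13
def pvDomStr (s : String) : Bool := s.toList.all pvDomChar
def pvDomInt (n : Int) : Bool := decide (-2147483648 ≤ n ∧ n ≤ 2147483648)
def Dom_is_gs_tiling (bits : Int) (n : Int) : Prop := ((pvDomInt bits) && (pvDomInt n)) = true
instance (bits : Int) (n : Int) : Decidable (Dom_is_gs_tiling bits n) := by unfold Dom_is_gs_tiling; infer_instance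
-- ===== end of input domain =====

-- B replaces A's tiles list + index dict by closed-form triangular indices and one
-- integer comparison of a transposed bitmask ("alternative": different algorithm, not faster).

-- ===== PORT A =====
def get_tile_indices (n : Int) : List (Int × Int) :=
  (PySem.List.pyRange 0 n).foldl
    (fun tiles i =>
      (PySem.List.pyRange (i + 1) n).foldl (fun tiles j => tiles ++ [(i, j)]) tiles)
    []

def transpose_index (i : Int) (j : Int) (n : Int) : Int × Int :=
  (n - 1 - j, n - 1 - i)

-- list(enumerate(xs)): a tail-recursive counter loop (the structural PySem.List.enumerate
-- overflows the interpreter stack on long lists; proved equal to it in pyEnum_eq below)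
def pyEnum (xs : List (Int × Int)) : List (Int × (Int × Int)) :=
  ((xs.foldl (fun (st : Int × List (Int × (Int × Int))) x => (st.1 + 1, (st.1, x) :: st.2))
      ((0 : Int), ([] : List (Int × (Int × Int))))).2).reverse

def is_gs_tiling (bits : Int) (n : Int) : Bool :=
  let tiles := get_tile_indices n
  -- Python also binds m = len(tiles) here, but never uses it
  let tile_to_idx := (pyEnum tiles).foldl
    (fun d q => d.insert q.2 q.1) (PySem.Dict.empty (κ := Int × Int) (ν := Int))
  (pyEnum tiles).foldl
    (fun ok q =>
      let idx := q.1
      let i := q.2.1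
      let j := q.2.2
      let t := transpose_index i j n
      let ti := if t.1 > t.2 then t.2 else t.1
      let tj := if t.1 > t.2 then t.1 else t.2
      if tile_to_idx.contains (ti, tj) = false then ok   -- 'not in': continue
      else
        -- tile_to_idx[(ti,tj)]: guarded by the contains test, so the default is never taken
        let tidx := (tile_to_idx.get? (ti, tj)).getD 0
        -- '(bits >> idx) & 1': idx and tidx are enumerate indices, hence ≥ 0, so .toNat is exact
        if PySem.Int.band (bits >>> idx.toNat) 1 ≠ PySem.Int.band (bits >>> tidx.toNat) 1 then false
        else ok)
    true

-- ===== PORT B =====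
def is_gs_tiling_alt (bits : Int) (n : Int) : Bool :=
  let m : Int := if 0 < n then PySem.Int.floordiv (n * (n - 1)) 2 else 0
  let st :=
    (PySem.List.pyRange 0 n).foldl
      (fun (st : Int × Int) i =>
        (PySem.List.pyRange (i + 1) n).foldl
          (fun st j =>
            let ti := n - 1 - j
            let tj := n - 1 - i
            let tidx := PySem.Int.floordiv (ti * (2 * n - ti - 1)) 2 + (tj - ti - 1)
            -- 'reflected += ((bits >> tidx) & 1) << idx': tidx and the counter are ≥ 0
            -- inside the loop, so .toNat is exact
            (st.1 + (PySem.Int.band (bits >>> tidx.toNat) 1) <<< st.2.toNat, st.2 + 1))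
          st)
      ((0 : Int), (0 : Int))
  -- 'bits % (1 << m)': m ≥ 0 always, so .toNat is exact
  decide (st.1 = PySem.Int.mod bits ((1 : Int) <<< m.toNat))

-- ===== PRECONDITION & SPEC =====
def Spec_is_gs_tiling (bits : Int) (n : Int) (out : Bool) : Prop := out = is_gs_tiling_alt bits n
instance (bits : Int) (n : Int) (out : Bool) : Decidable (Spec_is_gs_tiling bits n out) := by unfold Spec_is_gs_tiling; infer_instance

-- ===== CLAIM (what is proved, stated in full; the proofs are below) =====
def Claim_equal_is_gs_tiling : Prop := ∀ (bits : Int) (n : Int), Dom_is_gs_tiling bits n → Spec_is_gs_tiling bits n (is_gs_tiling bits n)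

-- ===== LEMMAS AND PROOFS =====

-- the triangular (closed-form) linear index of tile (i, j), and its row base
def pvBase (n i : Int) : Int := PySem.Int.floordiv (i * (2 * n - i - 1)) 2
def pvLin (n i j : Int) : Int := PySem.Int.floordiv (i * (2 * n - i - 1)) 2 + (j - i - 1)
-- the tail of the tile list starting at row i
def pvPairs (n i : Int) : List (Int × Int) :=
  (PySem.List.pyRange i n).flatMap (fun a => (PySem.List.pyRange (a + 1) n).map (fun j => (a, j)))
-- the bit of `bits` at (nonnegative) position k
def pvG (bits k : Int) : Int := PySem.Int.band (bits >>> k.toNat) 1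
-- value of a little-endian digit list
def pvVal : List Int → Int
  | [] => 0
  | x :: xs => x + 2 * pvVal xs

lemma pvVal_cons (x : Int) (xs : List Int) : pvVal (x :: xs) = x + 2 * pvVal xs := rfl

lemma pvLin_def (n i j : Int) : pvLin n i j = pvBase n i + (j - i - 1) := rfl

lemma tiles_eq (n : Int) : get_tile_indices n = pvPairs n 0 := by
  unfold get_tile_indices pvPairs
  rw [PySem.List.foldl_congr_mem _ _
      (fun acc i => acc ++ (PySem.List.pyRange (i + 1) n).map (fun j => (i, j))) _
      (fun acc i _ => PySem.List.foldl_append_singleton_eq_map _ _ _)]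
  rw [PySem.List.foldl_append_eq_flatMap]
  rfl

lemma base_succ (n i : Int) : pvBase n (i + 1) = pvBase n i + (n - i - 1) := by
  unfold pvBase
  have h2 : (2:Int) ≠ 0 := by norm_num
  rw [PySem.Int.floordiv_eq_ediv_of_pos (by norm_num), PySem.Int.floordiv_eq_ediv_of_pos (by norm_num)]
  have : (i + 1) * (2 * n - (i + 1) - 1) = i * (2 * n - i - 1) + (n - i - 1) * 2 := by ring
  rw [this, Int.add_mul_ediv_right _ _ h2]

lemma pairs_nil {n i : Int} (h : n ≤ i) : pvPairs n i = [] := by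
  unfold pvPairs
  rw [PySem.List.pyRange_one_eq_nil h]
  rfl

lemma pairs_cons {n i : Int} (h : i < n) :
    pvPairs n i = (PySem.List.pyRange (i + 1) n).map (fun j => (i, j)) ++ pvPairs n (i + 1) := by
  unfold pvPairs
  rw [PySem.List.pyRange_one_cons h, List.flatMap_cons]

lemma mem_pairs {n i : Int} {p : Int × Int} :
    p ∈ pvPairs n i ↔ i ≤ p.1 ∧ p.1 < p.2 ∧ p.2 < n := by
  unfold pvPairs
  simp only [List.mem_flatMap, List.mem_map, PySem.List.mem_pyRange_one]
  constructor
  · rintro ⟨a, ⟨ha1, ha2⟩, j, ⟨hj1, hj2⟩, rfl⟩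
    exact ⟨ha1, by omega, hj2⟩
  · rintro ⟨h1, h2, h3⟩
    exact ⟨p.1, ⟨h1, by omega⟩, p.2, ⟨by omega, h3⟩, rfl⟩

lemma enum_map_pyRange (a b s : Int) (f : Int → Int × Int) :
    PySem.List.enumerate ((PySem.List.pyRange a b).map f) s
      = (PySem.List.pyRange a b).map (fun j => (s + (j - a), f j)) := by
  generalize hk : (b - a).toNat = k
  induction k generalizing a s with
  | zero =>
    rw [PySem.List.pyRange_one_eq_nil (by omega)]
    rfl
  | succ k ih =>
    have hab : a < b := by omega
    rw [PySem.List.pyRange_one_cons hab, List.map_cons, PySem.List.enumerate_cons,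
      List.map_cons, ih (a + 1) (s + 1) (by omega)]
    congr 1
    · congr 1
      omega
    · refine List.map_congr_left (fun j _ => ?_)
      congr 1
      omega

lemma enum_pairs (n : Int) : ∀ (k : Nat) (i : Int), (n - i).toNat = k →
    PySem.List.enumerate (pvPairs n i) (pvBase n i)
      = (pvPairs n i).map (fun p => (pvLin n p.1 p.2, p)) := by
  intro k
  induction k with
  | zero =>
    intro i hi
    rw [pairs_nil (by omega)]
    rfl
  | succ k ih =>
    intro i hi
    have hin : i < n := by omega
    rw [pairs_cons hin, PySem.List.enumerate_append, enum_map_pyRange, List.map_append,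
      List.map_map]
    have hlen : pvBase n i + (((PySem.List.pyRange (i + 1) n).map (fun j => (i, j))).length : Int)
        = pvBase n (i + 1) := by
      rw [List.length_map, PySem.List.length_pyRange_one, base_succ]
      omega
    rw [hlen, ih (i + 1) (by omega)]
    congr 1
    refine List.map_congr_left (fun j _ => ?_)
    simp only [Function.comp]
    congr 1
    rw [pvLin_def]
    omega

lemma base_zero (n : Int) : pvBase n 0 = 0 := by
  unfold pvBase
  norm_num [PySem.Int.floordiv_eq_ediv_of_pos]

lemma enum_pairs0 (n : Int) :
    PySem.List.enumerate (pvPairs n 0) 0 = (pvPairs n 0).map (fun p => (pvLin n p.1 p.2, p)) := by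
  have h := enum_pairs n (n - 0).toNat 0 rfl
  rwa [base_zero] at h

lemma len_pairs (n : Int) : ∀ (k : Nat) (i : Int), (n - i).toNat = k → i ≤ n →
    ((pvPairs n i).length : Int) = pvBase n n - pvBase n i := by
  intro k
  induction k with
  | zero =>
    intro i hi hin
    have : i = n := by omega
    subst this
    rw [pairs_nil le_rfl]
    simp
  | succ k ih =>
    intro i hi hin
    have hlt : i < n := by omega
    rw [pairs_cons hlt, List.length_append, List.length_map, PySem.List.length_pyRange_one]
    have hih := ih (i + 1) (by omega) (by omega)
    have hb := base_succ n i
    push_cast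
    omega

lemma map_lin_pairs (n : Int) :
    (pvPairs n 0).map (fun p => pvLin n p.1 p.2) = PySem.List.pyRange 0 ((pvPairs n 0).length : Int) := by
  have h := congrArg (List.map (fun x : Int × (Int × Int) => x.1)) (enum_pairs0 n)
  rw [PySem.List.map_fst_enumerate] at h
  simp only [List.map_map, Function.comp_def] at h
  rw [zero_add] at h
  exact h.symm

lemma get?_foldl_insert (l : List (Int × Int)) (f : Int × Int → Int)
    (d : PySem.Dict (Int × Int) Int) (k : Int × Int) :
    ((l.foldl (fun d x => d.insert x (f x)) d).get? k)
      = if k ∈ l then some (f k) else d.get? k := by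
  induction l generalizing d with
  | nil => simp
  | cons x xs ih =>
    rw [List.foldl_cons, ih]
    by_cases hmem : k ∈ xs
    · simp [hmem]
    · by_cases hk : k = x
      · subst hk
        simp [hmem, PySem.Dict.get?_insert_self]
      · simp [hmem, hk, PySem.Dict.get?_insert_of_ne _ _ hk]

lemma pvG_cases (bits k : Int) : pvG bits k = 0 ∨ pvG bits k = 1 := by
  unfold pvG
  rw [PySem.Int.band_one]
  have h1 := PySem.Int.mod_nonneg (bits >>> k.toNat) (by norm_num : (0:Int) < 2)
  have h2 := PySem.Int.mod_lt (bits >>> k.toNat) (by norm_num : (0:Int) < 2)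
  omega

lemma pvVal_nonneg (xs : List Int) (h : ∀ x ∈ xs, x = 0 ∨ x = 1) : 0 ≤ pvVal xs := by
  induction xs with
  | nil => simp [pvVal]
  | cons x xs ih =>
    have hx := h x (by simp)
    have := ih (fun y hy => h y (by simp [hy]))
    unfold pvVal
    omega

lemma pvVal_inj (xs : List Int) : ∀ (ys : List Int), xs.length = ys.length →
    (∀ x ∈ xs, x = 0 ∨ x = 1) → (∀ y ∈ ys, y = 0 ∨ y = 1) →
    (pvVal xs = pvVal ys ↔ xs = ys) := by
  induction xs with
  | nil =>
    intro ys hlen _ _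
    rw [List.length_nil] at hlen
    rw [List.eq_nil_of_length_eq_zero hlen.symm]
    simp
  | cons x xs ih =>
    intro ys hlen hx hy
    cases ys with
    | nil => simp at hlen
    | cons y ys =>
      simp only [List.length_cons, Nat.add_right_cancel_iff] at hlen
      have hx0 := hx x (by simp)
      have hy0 := hy y (by simp)
      have hxs : ∀ z ∈ xs, z = 0 ∨ z = 1 := fun z hz => hx z (by simp [hz])
      have hys : ∀ z ∈ ys, z = 0 ∨ z = 1 := fun z hz => hy z (by simp [hz])
      have h1 := pvVal_nonneg xs hxs
      have h2 := pvVal_nonneg ys hys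
      have hih := ih ys hlen hxs hys
      constructor
      · intro heq
        unfold pvVal at heq
        have hxy : x = y ∧ pvVal xs = pvVal ys := by omega
        rw [hxy.1, (hih.mp hxy.2)]
      · intro heq
        injection heq with e1 e2
        unfold pvVal
        rw [e1, e2]

lemma shiftRight_one (b : Int) : b >>> (1 : Nat) = PySem.Int.floordiv b 2 := by
  rw [Int.shiftRight_eq_div_pow, PySem.Int.floordiv_eq_ediv_of_pos (by norm_num : (0:Int) < 2)]
  norm_num

lemma mod_split (b M : Int) (hM : 0 < M) :
    PySem.Int.mod b (2 * M) = PySem.Int.mod b 2 + 2 * PySem.Int.mod (PySem.Int.floordiv b 2) M := by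
  have hM2 : (0 : Int) < 2 * M := by omega
  have hq := PySem.Int.floordiv_mul_add_mod b 2
  have hq2 := PySem.Int.floordiv_mul_add_mod (PySem.Int.floordiv b 2) M
  have hr0a := PySem.Int.mod_nonneg b (by norm_num : (0:Int) < 2)
  have hr0b := PySem.Int.mod_lt b (by norm_num : (0:Int) < 2)
  have hra := PySem.Int.mod_nonneg (PySem.Int.floordiv b 2) hM
  have hrb := PySem.Int.mod_lt (PySem.Int.floordiv b 2) hM
  set Q := PySem.Int.floordiv (PySem.Int.floordiv b 2) M with hQ
  set r := PySem.Int.mod (PySem.Int.floordiv b 2) M with hr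
  set r0 := PySem.Int.mod b 2 with hr0
  have hb : b = Q * (2 * M) + (2 * r + r0) := by linear_combination (-1 : Int) * hq - 2 * hq2
  have hexp : (Q + 1) * (2 * M) = Q * (2 * M) + 2 * M := by ring
  have hfd : PySem.Int.floordiv b (2 * M) = Q :=
    (PySem.Int.floordiv_eq_iff_of_pos hM2).mpr ⟨by linarith, by linarith⟩
  have hfin := PySem.Int.floordiv_mul_add_mod b (2 * M)
  rw [hfd] at hfin
  linarith

lemma val_range_bits (K : Nat) : ∀ (b : Int),
    pvVal ((List.range K).map (fun (k : Nat) => PySem.Int.band (b >>> k) 1)) = PySem.Int.mod b ((2 : Int) ^ K) := by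
  induction K with
  | zero =>
    intro b
    have h1 := PySem.Int.floordiv_mul_add_mod b 1
    have h2 := PySem.Int.mod_nonneg b (by norm_num : (0:Int) < 1)
    have h3 := PySem.Int.mod_lt b (by norm_num : (0:Int) < 1)
    simp only [List.range_zero, List.map_nil, pow_zero]
    unfold pvVal
    omega
  | succ K ih =>
    intro b
    rw [List.range_succ_eq_map, List.map_cons, List.map_map]
    have hcomp : ((fun (k : Nat) => PySem.Int.band (b >>> k) 1) ∘ Nat.succ)
        = fun (k : Nat) => PySem.Int.band ((b >>> (1 : Nat)) >>> k) 1 := by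
      funext k
      have : Nat.succ k = 1 + k := by omega
      rw [Function.comp_apply, this, Int.shiftRight_add]
    rw [hcomp, pvVal_cons, ih (b >>> (1 : Nat))]
    have hsh : b >>> (0 : Nat) = b := by simp
    rw [hsh, PySem.Int.band_one, shiftRight_one]
    have hpow : ((2 : Int) ^ (K + 1)) = 2 * 2 ^ K := by ring
    rw [hpow, mod_split b ((2:Int) ^ K) (by positivity)]

lemma counter_fold (g : Int × Int → Int) (l : List (Int × Int)) :
    ∀ (r s : Int), 0 ≤ s →
    l.foldl (fun (st : Int × Int) p => (st.1 + g p <<< st.2.toNat, st.2 + 1)) (r, s)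
      = (r + 2 ^ s.toNat * pvVal (l.map g), s + l.length) := by
  induction l with
  | nil =>
    intro r s _
    simp [pvVal]
  | cons x xs ih =>
    intro r s hs
    rw [List.map_cons, List.foldl_cons, ih _ (s + 1) (by omega)]
    have ht : (s + 1).toNat = s.toNat + 1 := by omega
    have h1 : r + g x <<< s.toNat + 2 ^ (s + 1).toNat * pvVal (xs.map g)
        = r + 2 ^ s.toNat * pvVal (g x :: xs.map g) := by
      rw [ht, Int.shiftLeft_eq, pvVal_cons]
      ring
    rw [h1]
    congr 1
    simp only [List.length_cons]
    push_cast
    ring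

lemma enum_fold (xs : List (Int × Int)) : ∀ (s : Int) (acc : List (Int × (Int × Int))),
    ((xs.foldl (fun (st : Int × List (Int × (Int × Int))) x => (st.1 + 1, (st.1, x) :: st.2))
        (s, acc)).2).reverse
      = acc.reverse ++ PySem.List.enumerate xs s := by
  induction xs with
  | nil =>
    intro s acc
    simp
  | cons x t ih =>
    intro s acc
    rw [List.foldl_cons, ih, PySem.List.enumerate_cons]
    simp

lemma pyEnum_eq (xs : List (Int × Int)) : pyEnum xs = PySem.List.enumerate xs 0 := by
  unfold pyEnum
  rw [enum_fold]
  simp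

lemma A_char (bits n : Int) :
    is_gs_tiling bits n
      = ! (pvPairs n 0).any (fun p =>
            decide (pvG bits (pvLin n p.1 p.2) ≠ pvG bits (pvLin n (n - 1 - p.2) (n - 1 - p.1)))) := by
  simp only [is_gs_tiling, tiles_eq]
  rw [pyEnum_eq]
  have hdict : ∀ q : Int × Int,
      (List.foldl (fun d (q : Int × (Int × Int)) => d.insert q.2 q.1)
        (PySem.Dict.empty (κ := Int × Int) (ν := Int))
        ((pvPairs n 0).map (fun p => (pvLin n p.1 p.2, p)))).get? q
      = if q ∈ pvPairs n 0 then some (pvLin n q.1 q.2) else none := by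
    intro q
    rw [List.foldl_map]
    have h := get?_foldl_insert (pvPairs n 0) (fun p => pvLin n p.1 p.2) PySem.Dict.empty q
    simp only [PySem.Dict.get?_empty] at h
    exact h
  rw [enum_pairs0, List.foldl_map]
  rw [PySem.List.foldl_congr_mem _ _
      (fun ok p => if (decide (pvG bits (pvLin n p.1 p.2)
          ≠ pvG bits (pvLin n (n - 1 - p.2) (n - 1 - p.1)))) = true then false else ok)
      true (fun ok p hp => ?_)]
  · rw [PySem.List.foldl_if_false_eq]
    exact Bool.true_and _
  · obtain ⟨i, j⟩ := p
    obtain ⟨h1, h2, h3⟩ := mem_pairs.mp hp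
    simp only at h1 h2 h3
    have hmem : ((n - 1 - j, n - 1 - i) : Int × Int) ∈ pvPairs n 0 :=
      mem_pairs.mpr ⟨by omega, by omega, by omega⟩
    simp only [transpose_index, gt_iff_lt]
    rw [if_neg (by omega : ¬ ((n : Int) - 1 - i < n - 1 - j)),
        if_neg (by omega : ¬ ((n : Int) - 1 - i < n - 1 - j))]
    rw [PySem.Dict.contains_eq_isSome_get?, hdict, if_pos hmem]
    simp only [Option.isSome_some, Bool.true_eq_false, if_false, Option.getD_some]
    simp only [pvG, decide_eq_true_eq, Int.shiftRight_natCast_right]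


lemma mask_len (n : Int) :
    (if 0 < n then PySem.Int.floordiv (n * (n - 1)) 2 else 0).toNat = (pvPairs n 0).length := by
  by_cases hn : 0 < n
  · rw [if_pos hn]
    have hl := len_pairs n (n - 0).toNat 0 rfl (by omega)
    rw [base_zero] at hl
    have harg : n * (2 * n - n - 1) = n * (n - 1) := by ring
    have hfd : PySem.Int.floordiv (n * (n - 1)) 2 = pvBase n n := by
      unfold pvBase
      rw [harg]
    rw [hfd]
    omega
  · rw [if_neg hn]
    rw [pairs_nil (by omega)]
    simp

lemma B_char (bits n : Int) :
    is_gs_tiling_alt bits n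
      = decide (pvVal ((pvPairs n 0).map (fun p => pvG bits (pvLin n (n - 1 - p.2) (n - 1 - p.1))))
          = pvVal ((pvPairs n 0).map (fun p => pvG bits (pvLin n p.1 p.2)))) := by
  unfold is_gs_tiling_alt
  have hfold :
      (PySem.List.pyRange 0 n).foldl
        (fun (st : Int × Int) i =>
          (PySem.List.pyRange (i + 1) n).foldl
            (fun st j =>
              let ti := n - 1 - j
              let tj := n - 1 - i
              let tidx := PySem.Int.floordiv (ti * (2 * n - ti - 1)) 2 + (tj - ti - 1)
              (st.1 + (PySem.Int.band (bits >>> tidx.toNat) 1) <<< st.2.toNat, st.2 + 1))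
            st)
        ((0 : Int), (0 : Int))
      = (pvPairs n 0).foldl
          (fun (st : Int × Int) p =>
            (st.1 + pvG bits (pvLin n (n - 1 - p.2) (n - 1 - p.1)) <<< st.2.toNat, st.2 + 1))
          ((0 : Int), (0 : Int)) := by
    unfold pvPairs
    rw [List.foldl_flatMap]
    refine PySem.List.foldl_congr_mem _ _ _ _ (fun st i _ => ?_)
    rw [List.foldl_map]
    rfl
  have hcnt := counter_fold (fun p => pvG bits (pvLin n (n - 1 - p.2) (n - 1 - p.1)))
      (pvPairs n 0) 0 0 le_rfl
  simp only [hfold, hcnt, Int.toNat_zero, pow_zero, one_mul, zero_add]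
  have hchain : ((pvPairs n 0).map (fun p => pvG bits (pvLin n p.1 p.2)))
      = (List.range (pvPairs n 0).length).map (fun (k : Nat) => PySem.Int.band (bits >>> k) 1) := by
    have h1 : (fun p : Int × Int => pvG bits (pvLin n p.1 p.2))
        = (pvG bits) ∘ (fun p : Int × Int => pvLin n p.1 p.2) := rfl
    rw [h1, ← List.map_map, map_lin_pairs, PySem.List.pyRange_zero_nat, List.map_map]
    refine List.map_congr_left (fun k _ => ?_)
    simp [pvG, Int.toNat_natCast]
  have hmod : PySem.Int.mod bits ((1 : Int) <<< (if 0 < n then PySem.Int.floordiv (n * (n - 1)) 2 else 0).toNat)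
      = pvVal ((pvPairs n 0).map (fun p => pvG bits (pvLin n p.1 p.2))) := by
    rw [mask_len, Int.shiftLeft_eq, one_mul, hchain, val_range_bits]
  rw [hmod]

-- ===== VERDICT (by name: the statement is the Claim_ definition above) =====
theorem is_gs_tiling_spec : Claim_equal_is_gs_tiling := by
  intro bits n _
  unfold Spec_is_gs_tiling
  rw [A_char, B_char]
  have hiff : (pvVal ((pvPairs n 0).map (fun p => pvG bits (pvLin n (n - 1 - p.2) (n - 1 - p.1))))
        = pvVal ((pvPairs n 0).map (fun p => pvG bits (pvLin n p.1 p.2))))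
      ↔ ∀ p ∈ pvPairs n 0, pvG bits (pvLin n (n - 1 - p.2) (n - 1 - p.1)) = pvG bits (pvLin n p.1 p.2) := by
    rw [pvVal_inj _ _ (by simp)
        (fun x hx => by
          simp only [List.mem_map] at hx; obtain ⟨p, _, rfl⟩ := hx; exact pvG_cases _ _)
        (fun y hy => by
          simp only [List.mem_map] at hy; obtain ⟨p, _, rfl⟩ := hy; exact pvG_cases _ _)]
    exact List.map_eq_map_iff
  by_cases h : ∀ p ∈ pvPairs n 0, pvG bits (pvLin n (n - 1 - p.2) (n - 1 - p.1)) = pvG bits (pvLin n p.1 p.2)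
  · have h1 : (pvPairs n 0).any (fun p =>
        decide (pvG bits (pvLin n p.1 p.2) ≠ pvG bits (pvLin n (n - 1 - p.2) (n - 1 - p.1)))) = false := by
      refine List.any_eq_false.mpr (fun p hp => by simp [h p hp])
    rw [h1, decide_eq_true (hiff.mpr h)]
    rfl
  · have h1 : (pvPairs n 0).any (fun p =>
        decide (pvG bits (pvLin n p.1 p.2) ≠ pvG bits (pvLin n (n - 1 - p.2) (n - 1 - p.1)))) = true := by
      rcases not_forall.mp h with ⟨p, hp⟩
      rcases Classical.not_imp.mp hp with ⟨hmem, hne⟩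
      exact List.any_eq_true.mpr ⟨p, hmem, decide_eq_true (fun hc => hne hc.symm)⟩
    rw [h1, decide_eq_false (fun hc => h (hiff.mp hc))]
    rfl
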